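-- pv_equiv track=rewrite | github.com/sirzzang/upstage-platform-tools | commit_guardian/review_tools.py | parse_diff_stats
-- ===== SOURCE A (Python) =====
-- def parse_diff_stats(diff_text: str) -> str:
--     """diff 통계 요약: 파일 수, 추가/삭제 줄."""
--     additions = 0
--     deletions = 0
--     files = set()
--
--     for line in diff_text.split("\n"):
--         if line.startswith("diff --git"):
--             parts = line.split(" b/")
--             if len(parts) > 1:
--                 files.add(parts[-1])
--         elif line.startswith("+") and not line.startswith("+++"):
--             additions += 1
--         elif line.startswith("-") and not line.startswith("---"):
--             deletions += 1
--
--     return (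
--         f"변경 파일 수: {len(files)}\n"
--         f"추가된 줄: +{additions}\n"
--         f"삭제된 줄: -{deletions}\n"
--         f"변경 파일:\n" + "\n".join(f"  - {f}" for f in sorted(files))
--     )
-- ===== SOURCE B (Python) =====
-- def _header_file(line):
--     if line.startswith("diff --git"):
--         parts = line.split(" b/")
--         if len(parts) > 1:
--             return parts[-1]
--     return None
--
--
-- def parse_diff_stats(diff_text: str) -> str:
--     lines = diff_text.split("\n")
--     files = sorted({f for f in map(_header_file, lines) if f is not None})
--     additions = sum(1 for line in lines
--                     if line.startswith("+") and not line.startswith("+++"))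
--     deletions = sum(1 for line in lines
--                     if line.startswith("-") and not line.startswith("---"))
--     return (
--         f"변경 파일 수: {len(files)}\n"
--         f"추가된 줄: +{additions}\n"
--         f"삭제된 줄: -{deletions}\n"
--         f"변경 파일:\n" + "\n".join(f"  - {f}" for f in files)
--     )
-- ===== Notes on version B (the rewrite author's own statement) =====
-- stated objective: alternative
-- what changed: Replaces A's single stateful loop with an elif chain and three accumulators by three independent passes over the lines: a filter-map pass collecting header file names into a set, and two counting passes for added/deleted lines.
import Mathlib
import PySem

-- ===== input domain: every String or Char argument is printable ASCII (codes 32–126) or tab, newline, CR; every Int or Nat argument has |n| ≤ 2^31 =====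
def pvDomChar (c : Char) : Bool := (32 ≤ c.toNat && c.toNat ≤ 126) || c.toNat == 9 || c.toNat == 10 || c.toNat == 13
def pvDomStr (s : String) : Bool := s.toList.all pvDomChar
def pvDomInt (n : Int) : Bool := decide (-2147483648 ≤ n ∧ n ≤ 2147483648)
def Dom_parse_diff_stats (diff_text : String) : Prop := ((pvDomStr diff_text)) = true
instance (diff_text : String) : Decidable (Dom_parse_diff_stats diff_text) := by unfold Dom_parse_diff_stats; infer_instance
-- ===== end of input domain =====

-- B replaces A's single classifying loop (elif chain, three accumulators) by three independent passes over the lines; objective: alternative decomposition, same cost.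

-- ===== PORT A =====
-- one step of A's for-loop; state = (additions, deletions, files)
def pvAStep (st : Int × Int × PySem.Set String) (line : String) : Int × Int × PySem.Set String :=
  if PySem.Str.startswith line "diff --git" then
    let parts := (PySem.Str.split? line " b/").getD []
    if parts.length > 1 then (st.1, st.2.1, PySem.Set.add st.2.2 (PySem.List.pyGetD parts (-1) ""))
    else st
  else if PySem.Str.startswith line "+" && !PySem.Str.startswith line "+++" then
    (st.1 + 1, st.2.1, st.2.2)
  else if PySem.Str.startswith line "-" && !PySem.Str.startswith line "---" then
    (st.1, st.2.1 + 1, st.2.2)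
  else st

def parse_diff_stats (diff_text : String) : String :=
  let st := ((PySem.Str.split? diff_text "\n").getD []).foldl pvAStep (0, 0, PySem.Set.empty)
  "변경 파일 수: " ++ PySem.Int.toStr (st.2.2.length : Int) ++
  "\n추가된 줄: +" ++ PySem.Int.toStr st.1 ++
  "\n삭제된 줄: -" ++ PySem.Int.toStr st.2.1 ++
  "\n변경 파일:\n" ++ PySem.Str.join "\n" ((PySem.List.sorted st.2.2 (fun x => x) false).map (fun f => "  - " ++ f))

-- ===== PORT B =====
def pvHeaderFile (line : String) : Option String :=
  if PySem.Str.startswith line "diff --git" then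
    let parts := (PySem.Str.split? line " b/").getD []
    if parts.length > 1 then some (PySem.List.pyGetD parts (-1) "") else none
  else none

def pvIsAdd (line : String) : Bool :=
  PySem.Str.startswith line "+" && !PySem.Str.startswith line "+++"

def pvIsDel (line : String) : Bool :=
  PySem.Str.startswith line "-" && !PySem.Str.startswith line "---"

def parse_diff_stats_alt (diff_text : String) : String :=
  let lines := (PySem.Str.split? diff_text "\n").getD []
  let files := PySem.List.sorted (PySem.Set.ofList (lines.filterMap pvHeaderFile)) (fun x => x) false
  let additions : Int := ((lines.filter pvIsAdd).length : Int)
  let deletions : Int := ((lines.filter pvIsDel).length : Int)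
  "변경 파일 수: " ++ PySem.Int.toStr (files.length : Int) ++
  "\n추가된 줄: +" ++ PySem.Int.toStr additions ++
  "\n삭제된 줄: -" ++ PySem.Int.toStr deletions ++
  "\n변경 파일:\n" ++ PySem.Str.join "\n" (files.map (fun f => "  - " ++ f))

-- ===== PRECONDITION & SPEC =====
def Spec_parse_diff_stats (diff_text : String) (out : String) : Prop := out = parse_diff_stats_alt diff_text
instance (diff_text : String) (out : String) : Decidable (Spec_parse_diff_stats diff_text out) := by unfold Spec_parse_diff_stats; infer_instance

-- ===== CLAIM (what is proved, stated in full; the proofs are below) =====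
def Claim_equal_parse_diff_stats : Prop := ∀ (diff_text : String), Dom_parse_diff_stats diff_text → Spec_parse_diff_stats diff_text (parse_diff_stats diff_text)

-- ===== LEMMAS AND PROOFS =====

-- a line starting with "diff --git" starts with 'd', hence with no prefix whose first char differs from 'd'
lemma pvHdNot (l : String) (p : String) (c : Char)
    (hp : p.toList = c :: p.toList.tail)
    (h : PySem.Str.startswith l "diff --git" = true)
    (hcd : c ≠ 'd') :
    PySem.Str.startswith l p = false := by
  cases hx : PySem.Str.startswith l p with
  | false => rfl
  | true =>
    exfalso
    have h1 : ("diff --git").toList <+: l.toList :=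
      (PySem.Chars.startswith_iff _ _).mp (by simpa using h)
    have h2 : p.toList <+: l.toList :=
      (PySem.Chars.startswith_iff _ _).mp (by simpa using hx)
    obtain ⟨t1, ht1⟩ := h1
    obtain ⟨t2, ht2⟩ := h2
    have := congrArg List.head? (ht2.trans ht1.symm)
    rw [hp, show ("diff --git").toList = 'd' :: ("iff --git").toList from rfl] at this
    simp at this
    exact hcd this

-- A's loop over any line list = B's three independent passes (generalized over the accumulator)
lemma pvLoop (lines : List String) (a d : Int) (s : PySem.Set String) :
    lines.foldl pvAStep (a, d, s) =
      (a + ((lines.filter pvIsAdd).length : Int),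
       d + ((lines.filter pvIsDel).length : Int),
       (lines.filterMap pvHeaderFile).foldl PySem.Set.add s) := by
  induction lines generalizing a d s with
  | nil => simp
  | cons l t ih =>
    rw [List.foldl_cons, List.filter_cons, List.filter_cons, List.filterMap_cons]
    by_cases hg : PySem.Str.startswith l "diff --git" = true
    · have hplus := pvHdNot l "+" '+' rfl hg (by decide)
      have hminus := pvHdNot l "-" '-' rfl hg (by decide)
      have hadd : pvIsAdd l = false := by
        simp only [pvIsAdd, hplus, Bool.false_and]
      have hdel : pvIsDel l = false := by
        simp only [pvIsDel, hminus, Bool.false_and]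
      rw [hadd, hdel]
      by_cases hp : ((PySem.Str.split? l " b/").getD []).length > 1
      · have hstep : pvAStep (a, d, s) l =
            (a, d, PySem.Set.add s (PySem.List.pyGetD ((PySem.Str.split? l " b/").getD []) (-1) "")) := by
          simp only [pvAStep, hg, if_true, hp]
        have hhf : pvHeaderFile l =
            some (PySem.List.pyGetD ((PySem.Str.split? l " b/").getD []) (-1) "") := by
          simp only [pvHeaderFile, hg, if_true, hp]
        rw [hstep, hhf, ih]
        simp
      · have hstep : pvAStep (a, d, s) l = (a, d, s) := by
          simp only [pvAStep, hg, if_true, hp]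
          rfl
        have hhf : pvHeaderFile l = none := by
          simp only [pvHeaderFile, hg, if_true, hp]
          rfl
        rw [hstep, hhf, ih]
        simp
    · have hg' : PySem.Str.startswith l "diff --git" = false := by
        cases hx : PySem.Str.startswith l "diff --git"
        · rfl
        · exact absurd hx hg
      have hhf : pvHeaderFile l = none := by
        simp only [pvHeaderFile, hg', Bool.false_eq_true, if_false]
      rw [hhf]
      by_cases ha : pvIsAdd l = true
      · have hdel : pvIsDel l = false := by
          simp only [pvIsAdd, Bool.and_eq_true] at ha
          cases hx : PySem.Str.startswith l "-" with
          | false => simp only [pvIsDel, hx, Bool.false_and]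
          | true =>
            exfalso
            have h1 : ("+").toList <+: l.toList :=
              (PySem.Chars.startswith_iff _ _).mp (by simpa using ha.1)
            have h2 : ("-").toList <+: l.toList :=
              (PySem.Chars.startswith_iff _ _).mp (by simpa using hx)
            obtain ⟨t1, ht1⟩ := h1
            obtain ⟨t2, ht2⟩ := h2
            have := congrArg List.head? (ht2.trans ht1.symm)
            simp at this
        have hstep : pvAStep (a, d, s) l = (a + 1, d, s) := by
          simp only [pvIsAdd] at ha
          simp only [pvAStep, hg', Bool.false_eq_true, if_false, ha, if_true]
        rw [hstep, ha, hdel, ih]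
        refine Prod.ext ?_ rfl
        simp only [if_pos trivial, List.length_cons, Nat.cast_add, Nat.cast_one]
        ring
      · have ha' : pvIsAdd l = false := by
          cases hx : pvIsAdd l
          · rfl
          · exact absurd hx ha
        rw [ha']
        by_cases hd : pvIsDel l = true
        · have hstep : pvAStep (a, d, s) l = (a, d + 1, s) := by
            have ha2 : (PySem.Str.startswith l "+" && !PySem.Str.startswith l "+++") = false := by
              simpa [pvIsAdd] using ha'
            have hd2 : (PySem.Str.startswith l "-" && !PySem.Str.startswith l "---") = true := by
              simpa [pvIsDel] using hd
            simp only [pvAStep, hg', Bool.false_eq_true, if_false, ha2, hd2, if_true]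
          rw [hstep, hd, ih]
          refine Prod.ext rfl (Prod.ext ?_ rfl)
          simp only [if_pos trivial, List.length_cons, Nat.cast_add, Nat.cast_one]
          ring
        · have hd' : pvIsDel l = false := by
            cases hx : pvIsDel l
            · rfl
            · exact absurd hx hd
          have hstep : pvAStep (a, d, s) l = (a, d, s) := by
            have ha2 : (PySem.Str.startswith l "+" && !PySem.Str.startswith l "+++") = false := by
              simpa [pvIsAdd] using ha'
            have hd2 : (PySem.Str.startswith l "-" && !PySem.Str.startswith l "---") = false := by
              simpa [pvIsDel] using hd'
            simp only [pvAStep, hg', Bool.false_eq_true, if_false, ha2, hd2]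
          rw [hstep, hd', ih]
          simp

-- ===== VERDICT (by name: the statement is the Claim_ definition above) =====
theorem parse_diff_stats_spec : Claim_equal_parse_diff_stats := by
  intro diff_text _
  unfold Spec_parse_diff_stats parse_diff_stats parse_diff_stats_alt
  rw [pvLoop]
  simp [PySem.Set.ofList_eq_foldl, PySem.Set.empty]
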